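-- pv_equiv track=rewrite | github.com/oksanaShafransky/StockAnalyzer | strategy_analyzer/utils.py | calculate_consecutive_boolean
-- ===== SOURCE A (Python) =====
-- def calculate_consecutive_boolean(series):
--     consecutive_days = []
--     current_streak = 0
--
--     for value in series:
--         if value:
--             current_streak += 1
--         else:
--             current_streak = 0
--         consecutive_days.append(current_streak)
--
--     return consecutive_days
-- ===== SOURCE B (Python) =====
-- from itertools import groupby
--
-- def calculate_consecutive_boolean(series):
--     result = []
--     for key, group in groupby(series, key=lambda v: bool(v)):
--         n = sum(1 for _ in group)
--         if key:
--             result.extend(range(1, n + 1))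
--         else:
--             result.extend([0] * n)
--     return result
-- ===== Notes on version B (the rewrite author's own statement) =====
-- stated objective: idiomatic
-- what changed: Replaces the per-element running-counter loop by itertools.groupby over maximal runs of equal truthiness, filling each truthy run with range(1, n+1) and each falsy run with zeros.
import Mathlib
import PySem

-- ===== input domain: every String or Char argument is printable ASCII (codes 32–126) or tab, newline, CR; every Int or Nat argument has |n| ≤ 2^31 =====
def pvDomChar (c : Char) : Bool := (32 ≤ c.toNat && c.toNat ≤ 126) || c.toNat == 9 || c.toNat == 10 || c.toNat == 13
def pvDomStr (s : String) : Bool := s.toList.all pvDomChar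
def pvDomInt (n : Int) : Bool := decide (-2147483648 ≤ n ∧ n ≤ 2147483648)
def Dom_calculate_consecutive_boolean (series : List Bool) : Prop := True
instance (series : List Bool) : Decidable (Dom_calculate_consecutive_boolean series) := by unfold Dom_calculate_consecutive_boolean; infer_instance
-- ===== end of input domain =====

-- B replaces the per-element running-counter loop with a groupby over maximal runs of
-- equal truthiness (idiomatic decomposition; same O(n) cost).

-- ===== PORT A =====
-- the for-loop of A: state = (accumulated list, current_streak)
def ccbLoopA : List Bool → List Int → Int → List Int
  | [], consecutive_days, _ => consecutive_days
  | value :: rest, consecutive_days, current_streak =>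
    if value then
      ccbLoopA rest (consecutive_days ++ [current_streak + 1]) (current_streak + 1)
    else
      ccbLoopA rest (consecutive_days ++ [(0 : Int)]) 0

def calculate_consecutive_boolean (series : List Bool) : List Int :=
  ccbLoopA series [] 0

-- ===== PORT B =====
-- the groupby loop of Source B: each step peels one maximal run of elements equal to the
-- head (key, run length n), emits range(1, n+1) or [0]*n, and recurses on the rest
def ccbRunsB : List Bool → List Int
  | [] => []
  | key :: rest =>
    let grp := rest.takeWhile (· == key)
    let n := grp.length + 1
    (if key then (List.range n).map (fun i : ℕ => ((i : Int) + 1)) else List.replicate n (0 : Int))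
      ++ ccbRunsB (rest.dropWhile (· == key))
termination_by s => s.length
decreasing_by
  simpa using Nat.lt_succ_of_le (List.length_dropWhile_le (· == key) rest)

def calculate_consecutive_boolean_alt (series : List Bool) : List Int :=
  ccbRunsB series

-- ===== PRECONDITION & SPEC =====
def Spec_calculate_consecutive_boolean (series : List Bool) (out : List Int) : Prop := out = calculate_consecutive_boolean_alt series
instance (series : List Bool) (out : List Int) : Decidable (Spec_calculate_consecutive_boolean series out) := by unfold Spec_calculate_consecutive_boolean; infer_instance

-- ===== CLAIM (what is proved, stated in full; the proofs are below) =====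
def Claim_equal_calculate_consecutive_boolean : Prop := ∀ (series : List Bool), Dom_calculate_consecutive_boolean series → Spec_calculate_consecutive_boolean series (calculate_consecutive_boolean series)

-- ===== LEMMAS AND PROOFS =====


-- streak values produced from position onward, given the incoming streak k
def ccbSpec : List Bool → Int → List Int
  | [], _ => []
  | v :: rest, k => if v then (k + 1) :: ccbSpec rest (k + 1) else 0 :: ccbSpec rest 0

theorem ccbLoopA_eq (s : List Bool) : ∀ (acc : List Int) (k : Int),
    ccbLoopA s acc k = acc ++ ccbSpec s k := by
  induction s with
  | nil => intro acc k; simp [ccbLoopA, ccbSpec]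
  | cons v rest ih =>
    intro acc k
    by_cases hv : v = true <;> simp [ccbLoopA, ccbSpec, hv, ih]

theorem ccbSpec_indep (t : List Bool) (k k' : Int)
    (h : t = [] ∨ t.head? = some false) : ccbSpec t k = ccbSpec t k' := by
  rcases h with h | h
  · subst h; rfl
  · cases t with
    | nil => rfl
    | cons x r =>
      simp at h
      simp [ccbSpec, h]

theorem ccbSpec_rep_true (m : ℕ) : ∀ (t : List Bool) (k : Int),
    ccbSpec (List.replicate m true ++ t) k
      = (List.range m).map (fun i : ℕ => k + ((i : Int) + 1)) ++ ccbSpec t (k + m) := by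
  induction m with
  | zero => intro t k; simp
  | succ m ih =>
    intro t k
    rw [List.replicate_succ, List.cons_append]
    show (k + 1) :: ccbSpec (List.replicate m true ++ t) (k + 1) = _
    rw [ih t (k + 1), List.range_succ_eq_map, List.map_cons, List.map_map]
    simp only [List.cons_append]
    congr 1
    congr 1
    · apply List.map_congr_left
      intro i _
      simp only [Function.comp_apply, Nat.succ_eq_add_one]
      push_cast
      ring
    · congr 1
      push_cast
      ring

theorem ccbSpec_rep_false (m : ℕ) : ∀ (t : List Bool) (k : Int),
    ccbSpec (List.replicate (m + 1) false ++ t) k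
      = List.replicate (m + 1) (0 : Int) ++ ccbSpec t 0 := by
  induction m with
  | zero => intro t k; simp [ccbSpec]
  | succ m ih =>
    intro t k
    rw [List.replicate_succ, List.cons_append]
    show (0 : Int) :: ccbSpec (List.replicate (m + 1) false ++ t) 0 = _
    rw [ih t 0]
    rw [show m + 1 + 1 = (m + 1) + 1 from rfl, List.replicate_succ (n := m + 1)]
    simp

theorem takeWhile_eq_replicate (b : Bool) (l : List Bool) :
    l.takeWhile (· == b) = List.replicate (l.takeWhile (· == b)).length b := by
  apply List.eq_replicate_of_mem
  intro x hx
  have := List.mem_takeWhile_imp hx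
  simpa using this

theorem dropWhile_head (b : Bool) (l : List Bool) :
    l.dropWhile (· == b) = [] ∨ (l.dropWhile (· == b)).head? = some (!b) := by
  cases h : l.dropWhile (· == b) with
  | nil => exact Or.inl rfl
  | cons x r =>
    right
    have hx : ¬ (x == b) = true := by
      have := List.head?_dropWhile_not (· == b) l
      rw [h] at this
      simpa using this
    cases x <;> cases b <;> simp_all

theorem ccbRunsB_eq (s : List Bool) : ccbRunsB s = ccbSpec s 0 := by
  induction s using ccbRunsB.induct with
  | case1 => rw [ccbRunsB]; rfl
  | case2 key rest ih =>
    have hsplit : key :: rest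
        = List.replicate ((rest.takeWhile (· == key)).length + 1) key
            ++ rest.dropWhile (· == key) := by
      rw [List.replicate_succ, List.cons_append]
      congr 1
      conv_lhs => rw [← List.takeWhile_append_dropWhile (p := (· == key)) (l := rest)]
      congr 1
      exact takeWhile_eq_replicate key rest
    rw [ccbRunsB]
    conv_rhs => rw [hsplit]
    cases key
    · rw [ccbSpec_rep_false, if_neg (by simp), ih]
    · rw [ccbSpec_rep_true, if_pos rfl]
      have hindep : ccbSpec (rest.dropWhile (· == true))
            ((0 : Int) + (((rest.takeWhile (· == true)).length + 1 : ℕ) : Int))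
          = ccbSpec (rest.dropWhile (· == true)) 0 := by
        apply ccbSpec_indep
        rcases dropWhile_head true rest with h | h
        · exact Or.inl h
        · exact Or.inr (by simpa using h)
      rw [hindep, ih]
      simp

-- ===== VERDICT (by name: the statement is the Claim_ definition above) =====
theorem calculate_consecutive_boolean_spec : Claim_equal_calculate_consecutive_boolean := by
  intro series _
  show calculate_consecutive_boolean series = calculate_consecutive_boolean_alt series
  rw [calculate_consecutive_boolean, calculate_consecutive_boolean_alt,
    ccbLoopA_eq, ccbRunsB_eq]
  simp
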